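-- pv_equiv track=rewrite | github.com/tratk/racunalnistvo-2 | seminarska naloga/Seminarska naloga - algoritmi/algoritmi.py | naiven_alg
-- ===== SOURCE A (Python) =====
-- def naiven_alg(besedilo, vzorec, izboljsaj):
--     st_primerjav = 0
--     n = len(besedilo)
--     m = len(vzorec)
--     ujemanja = []
--     for i in range(n-m + 1): #premika podniz cez besedilo
--         ujema = True
--         for j in range(m): #gre cez podniz/vzorec
--             st_primerjav += 1
--             if vzorec[j] != besedilo[i+j]: #primerja znaka na istem mestu
--                 ujema = False
--                 if izboljsaj:
--                     break #ne ujema, prekine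
--         if ujema: #doda v tabelo, če ujema
--             ujemanja.append(i)
--     return ujemanja, st_primerjav
-- ===== SOURCE B (Python) =====
-- def naiven_alg(besedilo, vzorec, izboljsaj):
--     n = len(besedilo)
--     m = len(vzorec)
--     k = max(0, n - m + 1)
--     if not izboljsaj:
--         # no early break: every window costs exactly m comparisons
--         ujemanja = [i for i in range(k) if besedilo[i:i+m] == vzorec]
--         return ujemanja, m * k
--     ujemanja = []
--     st_primerjav = 0
--     for i in range(k):
--         j = 0
--         while j < m and vzorec[j] == besedilo[i+j]:
--             j += 1
--         if j == m:
--             ujemanja.append(i)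
--             st_primerjav += m
--         else:
--             st_primerjav += j + 1
--     return ujemanja, st_primerjav
-- ===== Notes on version B (the rewrite author's own statement) =====
-- stated objective: alternative
-- what changed: B branches on izboljsaj: without the improvement the count is the closed form m*max(0,n-m+1) and matches come from slice equality (no inner character loop); with it B computes the first-mismatch index per window with a while loop and adds j+1 or m, instead of A's flag-and-break inner loop.
import Mathlib
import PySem

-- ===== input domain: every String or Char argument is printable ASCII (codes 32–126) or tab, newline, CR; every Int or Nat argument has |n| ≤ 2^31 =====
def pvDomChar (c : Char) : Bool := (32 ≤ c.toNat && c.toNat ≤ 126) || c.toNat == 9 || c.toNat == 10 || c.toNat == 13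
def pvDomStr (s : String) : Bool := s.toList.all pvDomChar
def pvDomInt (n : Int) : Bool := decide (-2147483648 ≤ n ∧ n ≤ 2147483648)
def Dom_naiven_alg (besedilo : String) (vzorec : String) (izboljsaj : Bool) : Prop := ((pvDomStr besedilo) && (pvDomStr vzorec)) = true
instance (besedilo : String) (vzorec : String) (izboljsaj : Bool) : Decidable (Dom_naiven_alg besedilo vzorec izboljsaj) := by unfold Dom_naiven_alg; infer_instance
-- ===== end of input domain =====

-- B replaces A's flag-and-break inner loop by a branch on izboljsaj: closed-form count
-- m*max(0,n-m+1) plus slice-equality matching when izboljsaj is false, and a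
-- first-mismatch-index scan per window when it is true (objective: alternative decomposition).

-- ===== PORT A =====
-- inner loop of A over j in range(m): since 0 ≤ i ≤ n-m, vzorec[j] and besedilo[i+j]
-- are always in range, so the j-indexed loop is exactly this element-wise recursion over
-- the pattern and the window suffix (besedilo dropped i times). State: (ujema, comparisons).
def pvInnerA (izb : Bool) : List Char → List Char → Bool × Int
  | [], _ => (true, 0)
  | _ :: _, [] => (true, 0)  -- unreachable: the window always has at least m characters
  | vj :: vs, bj :: bs =>
      if vj ≠ bj then
        if izb then (false, 1)                      -- break
        else let r := pvInnerA izb vs bs; (false, r.2 + 1)  -- ujema stays False, keep comparing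
      else let r := pvInnerA izb vs bs; (r.1, r.2 + 1)

-- outer loop of A over i in range(n-m+1); k counts the remaining windows, b is besedilo
-- with the first i characters dropped; state: (ujemanja, st_primerjav).
def pvOuterA (v : List Char) (izb : Bool) : Nat → Int → List Char → List Int × Int → List Int × Int
  | 0, _, _, acc => acc
  | k + 1, i, b, (uj, st) =>
      let r := pvInnerA izb v b
      pvOuterA v izb k (i + 1) b.tail (if r.1 then uj ++ [i] else uj, st + r.2)

def naiven_alg (besedilo : String) (vzorec : String) (izboljsaj : Bool) : List Int × Int :=
  pvOuterA vzorec.toList izboljsaj (besedilo.toList.length + 1 - vzorec.toList.length) 0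
    besedilo.toList ([], 0)

-- ===== PORT B =====
-- B's while loop: index of the first mismatching position, none if the pattern matches.
def pvFirstMismatch : List Char → List Char → Option Nat
  | [], _ => none
  | _ :: _, [] => none
  | x :: xs, y :: ys => if x ≠ y then some 0 else (pvFirstMismatch xs ys).map (· + 1)

-- B's loop for izboljsaj = True: first-mismatch index j per window, add j+1 or m.
def pvOuterB (v : List Char) : Nat → Int → List Char → List Int × Int → List Int × Int
  | 0, _, _, acc => acc
  | k + 1, i, b, (uj, st) =>
      match pvFirstMismatch v b with
      | none => pvOuterB v k (i + 1) b.tail (uj ++ [i], st + v.length)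
      | some j => pvOuterB v k (i + 1) b.tail (uj, st + ((j : Int) + 1))

-- B's comprehension for izboljsaj = False: windows where the slice equals the pattern.
def pvWins (v : List Char) : Nat → Int → List Char → List Int → List Int
  | 0, _, _, acc => acc
  | k + 1, i, b, acc =>
      pvWins v k (i + 1) b.tail (if b.take v.length == v then acc ++ [i] else acc)

def naiven_alg_alt (besedilo : String) (vzorec : String) (izboljsaj : Bool) : List Int × Int :=
  let b := besedilo.toList
  let v := vzorec.toList
  let k := b.length + 1 - v.length   -- = max(0, n-m+1)
  if izboljsaj then pvOuterB v k 0 b ([], 0)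
  else (pvWins v k 0 b [], (v.length : Int) * k)

-- ===== PRECONDITION & SPEC =====
def Spec_naiven_alg (besedilo : String) (vzorec : String) (izboljsaj : Bool) (out : List Int × Int) : Prop := out = naiven_alg_alt besedilo vzorec izboljsaj
instance (besedilo : String) (vzorec : String) (izboljsaj : Bool) (out : List Int × Int) : Decidable (Spec_naiven_alg besedilo vzorec izboljsaj out) := by unfold Spec_naiven_alg; infer_instance

-- ===== CLAIM (what is proved, stated in full; the proofs are below) =====
def Claim_equal_naiven_alg : Prop := ∀ (besedilo : String) (vzorec : String) (izboljsaj : Bool), Dom_naiven_alg besedilo vzorec izboljsaj → Spec_naiven_alg besedilo vzorec izboljsaj (naiven_alg besedilo vzorec izboljsaj)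

-- ===== LEMMAS AND PROOFS =====

-- Without the break, A's inner loop always makes exactly m comparisons and reports
-- whether the whole window matches.
theorem innerA_false (v : List Char) : ∀ b : List Char, v.length ≤ b.length →
    pvInnerA false v b = ((b.take v.length == v), (v.length : Int)) := by
  induction v with
  | nil => intro b _; simp [pvInnerA]
  | cons x xs ih =>
    intro b hb
    cases b with
    | nil => simp at hb
    | cons y ys =>
      simp only [List.length_cons, Nat.succ_le_succ_iff] at hb
      by_cases hxy : x = y
      · simp [pvInnerA, hxy, ih ys hb, List.cons_beq_cons]
      · have hyx : (y == x) = false := by simp [Ne.symm hxy]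
        simp [pvInnerA, hxy, ih ys hb, List.cons_beq_cons, hyx]

-- With the break, A's inner loop is B's first-mismatch scan.
theorem innerA_true (v : List Char) : ∀ b : List Char, v.length ≤ b.length →
    pvInnerA true v b = match pvFirstMismatch v b with
      | none => (true, (v.length : Int))
      | some j => (false, (j : Int) + 1) := by
  induction v with
  | nil => intro b _; simp [pvInnerA, pvFirstMismatch]
  | cons x xs ih =>
    intro b hb
    cases b with
    | nil => simp at hb
    | cons y ys =>
      simp only [List.length_cons, Nat.succ_le_succ_iff] at hb
      by_cases hxy : x = y
      · simp only [pvInnerA, pvFirstMismatch, hxy, ne_eq, not_true_eq_false, if_false]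
        rw [ih ys hb]
        cases h : pvFirstMismatch xs ys <;> simp
      · simp [pvInnerA, pvFirstMismatch, hxy]

theorem outer_false (v : List Char) : ∀ (k : Nat) (b : List Char) (i : Int) (uj : List Int) (st : Int),
    k ≤ b.length + 1 - v.length →
    pvOuterA v false k i b (uj, st) = (pvWins v k i b uj, st + (v.length : Int) * k) := by
  intro k
  induction k with
  | zero => intro b i uj st _; simp [pvOuterA, pvWins]
  | succ k ih =>
    intro b i uj st h
    have hlen : v.length ≤ b.length := by omega
    have hrec : k ≤ b.tail.length + 1 - v.length := by
      rcases b with _ | ⟨_, bs⟩ <;> simp at h ⊢ <;> omega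
    simp only [pvOuterA, pvWins, innerA_false v b hlen]
    rw [ih b.tail (i + 1) _ _ hrec]
    refine congrArg₂ Prod.mk rfl ?_
    push_cast; ring

theorem outer_true (v : List Char) : ∀ (k : Nat) (b : List Char) (i : Int) (uj : List Int) (st : Int),
    k ≤ b.length + 1 - v.length →
    pvOuterA v true k i b (uj, st) = pvOuterB v k i b (uj, st) := by
  intro k
  induction k with
  | zero => intro b i uj st _; simp [pvOuterA, pvOuterB]
  | succ k ih =>
    intro b i uj st h
    have hlen : v.length ≤ b.length := by omega
    have hrec : k ≤ b.tail.length + 1 - v.length := by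
      rcases b with _ | ⟨_, bs⟩ <;> simp at h ⊢ <;> omega
    simp only [pvOuterA, pvOuterB, innerA_true v b hlen]
    cases h : pvFirstMismatch v b with
    | none => exact ih b.tail (i + 1) (uj ++ [i]) _ hrec
    | some j =>
      simp only [Bool.false_eq_true, if_false]
      exact ih b.tail (i + 1) uj _ hrec

-- ===== VERDICT (by name: the statement is the Claim_ definition above) =====
theorem naiven_alg_spec : Claim_equal_naiven_alg := by
  intro besedilo vzorec izboljsaj _
  unfold Spec_naiven_alg naiven_alg naiven_alg_alt
  cases izboljsaj with
  | false =>
    rw [outer_false vzorec.toList (besedilo.toList.length + 1 - vzorec.toList.length)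
        besedilo.toList 0 [] 0 (le_refl _)]
    simp
  | true =>
    rw [outer_true vzorec.toList (besedilo.toList.length + 1 - vzorec.toList.length)
        besedilo.toList 0 [] 0 (le_refl _)]
    simp
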